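-- pv_equiv track=rewrite | github.com/ebsco/cloudcomprehend | visualize_network.py | name_from_tags
-- ===== SOURCE A (Python) =====
-- SECOND_NAME_FIELD = 'aws:cloudformation:logical-id'
--
-- def name_from_tags(resource):
--     if 'Tags' in resource:
--         for t in resource['Tags']:
--             if t['Key'] == 'Name':
--                 return t['Value']
--         for t_other in resource['Tags']:
--             if t_other['Key'] == SECOND_NAME_FIELD:
--                 return t_other['Value']
--         return ""
--     else:
--         return ""
-- ===== SOURCE B (Python) =====
-- SECOND_NAME_FIELD = 'aws:cloudformation:logical-id'
--
-- def name_from_tags(resource):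
--     if 'Tags' not in resource:
--         return ""
--     fallback = None
--     for t in resource['Tags']:
--         if t['Key'] == 'Name':
--             return t['Value']
--         if fallback is None and t['Key'] == SECOND_NAME_FIELD:
--             fallback = t
--     return fallback['Value'] if fallback is not None else ""
-- ===== Notes on version B (the rewrite author's own statement) =====
-- stated objective: alternative
-- what changed: Single pass over the tags that returns the first 'Name' value immediately and remembers the first logical-id tag as a lazily-read fallback, instead of A's two separate scans of the tag list.
import Mathlib
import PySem

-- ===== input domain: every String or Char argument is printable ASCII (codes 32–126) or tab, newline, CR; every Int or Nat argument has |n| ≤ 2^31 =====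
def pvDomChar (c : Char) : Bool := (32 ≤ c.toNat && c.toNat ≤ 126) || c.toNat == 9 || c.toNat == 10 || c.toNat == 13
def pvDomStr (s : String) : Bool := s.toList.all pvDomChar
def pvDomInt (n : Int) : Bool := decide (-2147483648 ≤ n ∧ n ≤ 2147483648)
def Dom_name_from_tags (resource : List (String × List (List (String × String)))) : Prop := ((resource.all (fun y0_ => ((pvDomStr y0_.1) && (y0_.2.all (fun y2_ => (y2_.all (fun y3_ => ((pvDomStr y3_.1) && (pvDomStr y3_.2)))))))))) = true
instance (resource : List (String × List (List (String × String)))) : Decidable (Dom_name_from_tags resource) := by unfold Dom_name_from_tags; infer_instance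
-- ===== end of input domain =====

-- B is a single pass over the tags (first 'Name' wins immediately, first logical-id tag kept as a
-- lazily-read fallback) instead of A's two separate scans; same cost, different decomposition.

-- t['Key'] / t['Value'] raise KeyError in Python when the key is absent; Pre_ excludes every input on
-- which either program would raise, so reading with default "" is exact on the admitted inputs.
def pvTagGet (t : List (String × String)) (k : String) : String := (List.lookup k t).getD ""

-- ===== PORT A =====
def pvFindName : List (List (String × String)) → Option String
  | [] => none
  | t :: rest => if pvTagGet t "Key" = "Name" then some (pvTagGet t "Value") else pvFindName rest

def pvFindSecond : List (List (String × String)) → Option String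
  | [] => none
  | t :: rest =>
      if pvTagGet t "Key" = "aws:cloudformation:logical-id" then some (pvTagGet t "Value")
      else pvFindSecond rest

def name_from_tags (resource : List (String × List (List (String × String)))) : String :=
  match List.lookup "Tags" resource with
  | none => ""
  | some tags =>
    match pvFindName tags with
    | some v => v
    | none =>
      match pvFindSecond tags with
      | some v => v
      | none => ""

-- ===== PORT B =====
def pvScan : List (List (String × String)) → Option (List (String × String)) → String
  | [], fb => match fb with | some t => pvTagGet t "Value" | none => ""
  | t :: rest, fb =>
      if pvTagGet t "Key" = "Name" then pvTagGet t "Value"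
      else if fb = none ∧ pvTagGet t "Key" = "aws:cloudformation:logical-id" then pvScan rest (some t)
      else pvScan rest fb

def name_from_tags_alt (resource : List (String × List (List (String × String)))) : String :=
  match List.lookup "Tags" resource with
  | none => ""
  | some tags => pvScan tags none

-- ===== PRECONDITION & SPEC =====
-- Exactly the inputs on which the Python programs return normally: every tag scanned before the
-- first 'Name' tag has a 'Key' entry, the tag whose 'Value' is finally read (the first 'Name' tag,
-- or else the first logical-id tag) has a 'Value' entry.
def pvPreTags (tags : List (List (String × String))) : Bool :=
  let p1 := tags.takeWhile (fun t => !(List.lookup "Key" t == some "Name"))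
  (p1.all (fun t => (List.lookup "Key" t).isSome)) &&
  (if p1.length < tags.length then (List.lookup "Value" (tags.getD p1.length [])).isSome
   else
     let p2 := tags.takeWhile (fun t => !(List.lookup "Key" t == some "aws:cloudformation:logical-id"))
     if p2.length < tags.length then (List.lookup "Value" (tags.getD p2.length [])).isSome
     else true)

def Pre_name_from_tags (resource : List (String × List (List (String × String)))) : Prop :=
  (match List.lookup "Tags" resource with
   | none => true
   | some tags => pvPreTags tags) = true

instance (resource : List (String × List (List (String × String)))) : Decidable (Pre_name_from_tags resource) := by
  unfold Pre_name_from_tags; infer_instance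

def pvWitness_name_from_tags : (List (String × List (List (String × String)))) :=
  [("Tags", [[("Key", "env"), ("Value", "prod")], [("Key", "Name"), ("Value", "web")]])]

def Spec_name_from_tags (resource : List (String × List (List (String × String)))) (out : String) : Prop := out = name_from_tags_alt resource
instance (resource : List (String × List (List (String × String)))) (out : String) : Decidable (Spec_name_from_tags resource out) := by unfold Spec_name_from_tags; infer_instance

-- ===== CLAIM (what is proved, stated in full; the proofs are below) =====
def Claim_equal_name_from_tags : Prop := ∀ (resource : List (String × List (List (String × String)))), Dom_name_from_tags resource → Pre_name_from_tags resource → Spec_name_from_tags resource (name_from_tags resource)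

-- ===== LEMMAS AND PROOFS =====
theorem pvScan_eq (tags : List (List (String × String))) :
    ∀ fb : Option (List (String × String)),
      pvScan tags fb =
        match pvFindName tags with
        | some v => v
        | none =>
          match fb with
          | some t => pvTagGet t "Value"
          | none => match pvFindSecond tags with | some v => v | none => "" := by
  induction tags with
  | nil => intro fb; cases fb <;> rfl
  | cons t rest ih =>
    intro fb
    by_cases hn : pvTagGet t "Key" = "Name"
    · simp [pvScan, pvFindName, hn]
    · by_cases hs : pvTagGet t "Key" = "aws:cloudformation:logical-id"
      · cases fb with
        | none => simp [pvScan, pvFindName, pvFindSecond, hs, ih]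
        | some s => simp [pvScan, pvFindName, hs, ih]
      · cases fb <;> simp [pvScan, pvFindName, pvFindSecond, hn, hs, ih]

-- ===== VERDICT (by name: the statement is the Claim_ definition above) =====
theorem name_from_tags_spec : Claim_equal_name_from_tags := by
  intro resource _ _
  unfold Spec_name_from_tags name_from_tags name_from_tags_alt
  cases List.lookup "Tags" resource with
  | none => rfl
  | some tags => simp only [pvScan_eq tags none]
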